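-- pv_equiv track=rewrite | github.com/raseen2305/broskies_1 | backend/app/services/hr_service.py | categorize_candidate
-- ===== SOURCE A (Python) =====
-- from typing import Dict, List, Optional, Tuple
--
-- def categorize_candidate(languages: Dict[str, int]) -> str:
--     """
--     Determine candidate role category from language usage
--
--     Args:
--         languages: Dictionary of language names to usage counts
--
--     Returns:
--         str: Role category (e.g., "Full-Stack Developer")
--     """
--     if not languages:
--         return "Software Developer"
--
--     # Define language categories
--     frontend_langs = {'JavaScript', 'TypeScript', 'HTML', 'CSS', 'React', 'Vue', 'Angular', 'Svelte'}
--     backend_langs = {'Python', 'Java', 'Go', 'Ruby', 'PHP', 'C#', 'Rust', 'Kotlin', 'Scala'}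
--     mobile_langs = {'Swift', 'Kotlin', 'Dart', 'Objective-C', 'React Native', 'Flutter'}
--     devops_langs = {'Shell', 'Bash', 'PowerShell', 'Dockerfile', 'YAML', 'HCL'}
--     data_langs = {'Python', 'R', 'Julia', 'SQL', 'Scala'}
--
--     # Calculate scores for each category
--     frontend_score = sum(languages.get(lang, 0) for lang in frontend_langs)
--     backend_score = sum(languages.get(lang, 0) for lang in backend_langs)
--     mobile_score = sum(languages.get(lang, 0) for lang in mobile_langs)
--     devops_score = sum(languages.get(lang, 0) for lang in devops_langs)
--     data_score = sum(languages.get(lang, 0) for lang in data_langs)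
--
--     # Determine category
--     if frontend_score > 0 and backend_score > 0 and frontend_score + backend_score > mobile_score:
--         return "Full-Stack Developer"
--     elif mobile_score > frontend_score and mobile_score > backend_score:
--         return "Mobile Developer"
--     elif frontend_score > backend_score:
--         return "Frontend Developer"
--     elif backend_score > frontend_score:
--         return "Backend Developer"
--     elif devops_score > frontend_score and devops_score > backend_score:
--         return "DevOps Engineer"
--     elif data_score > 0 and 'Python' in languages and 'R' in languages:
--         return "Data Scientist"
--     else:
--         return "Software Developer"
-- ===== SOURCE B (Python) =====
-- # Inverted index: each language maps to the list of category indices it belongs to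
-- # (0=frontend, 1=backend, 2=mobile, 3=devops, 4=data); one pass over the input
-- # accumulates a score vector via this table instead of scanning category sets.
-- LANG_CATS = {
--     'JavaScript': (0,), 'TypeScript': (0,), 'HTML': (0,), 'CSS': (0,),
--     'React': (0,), 'Vue': (0,), 'Angular': (0,), 'Svelte': (0,),
--     'Python': (1, 4), 'Java': (1,), 'Go': (1,), 'Ruby': (1,), 'PHP': (1,),
--     'C#': (1,), 'Rust': (1,), 'Kotlin': (1, 2), 'Scala': (1, 4),
--     'Swift': (2,), 'Dart': (2,), 'Objective-C': (2,), 'React Native': (2,),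
--     'Flutter': (2,),
--     'Shell': (3,), 'Bash': (3,), 'PowerShell': (3,), 'Dockerfile': (3,),
--     'YAML': (3,), 'HCL': (3,),
--     'R': (4,), 'Julia': (4,), 'SQL': (4,),
-- }
--
--
-- def categorize_candidate(languages):
--     """
--     Determine candidate role category from language usage
--     """
--     if not languages:
--         return "Software Developer"
--
--     scores = [0, 0, 0, 0, 0]
--     for lang, count in languages.items():
--         for cat in LANG_CATS.get(lang, ()):
--             scores[cat] += count
--     frontend_score, backend_score, mobile_score, devops_score, data_score = scores
--
--     if frontend_score > 0 and backend_score > 0 and frontend_score + backend_score > mobile_score: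
--         return "Full-Stack Developer"
--     elif mobile_score > frontend_score and mobile_score > backend_score:
--         return "Mobile Developer"
--     elif frontend_score > backend_score:
--         return "Frontend Developer"
--     elif backend_score > frontend_score:
--         return "Backend Developer"
--     elif devops_score > frontend_score and devops_score > backend_score:
--         return "DevOps Engineer"
--     elif data_score > 0 and 'Python' in languages and 'R' in languages:
--         return "Data Scientist"
--     else:
--         return "Software Developer"
-- ===== Notes on version B (the rewrite author's own statement) =====
-- stated objective: alternative
-- what changed: B inverts the five category sets into a single precomputed index LANG_CATS mapping each language to the category indices it belongs to, and accumulates a 5-slot score vector in one pass over languages.items() via that index, instead of A's five separate generator-sum scans over the category sets; the decision cascade is unchanged.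
import Mathlib
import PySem

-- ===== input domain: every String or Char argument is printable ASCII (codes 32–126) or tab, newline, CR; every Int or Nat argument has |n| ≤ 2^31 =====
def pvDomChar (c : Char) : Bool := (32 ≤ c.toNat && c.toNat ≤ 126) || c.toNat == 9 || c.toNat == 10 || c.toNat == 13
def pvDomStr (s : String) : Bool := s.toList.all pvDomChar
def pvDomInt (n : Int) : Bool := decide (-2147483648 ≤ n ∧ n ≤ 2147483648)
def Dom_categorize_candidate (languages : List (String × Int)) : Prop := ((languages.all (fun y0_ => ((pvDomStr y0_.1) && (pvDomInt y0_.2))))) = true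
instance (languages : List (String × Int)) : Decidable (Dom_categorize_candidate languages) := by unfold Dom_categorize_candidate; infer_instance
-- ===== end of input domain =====

-- B inverts the five category sets into one language→categories index and accumulates a
-- 5-slot score vector in a single pass over the items (objective: alternative decomposition).


-- ===== PORT A =====
-- the five category sets (Python set literals of distinct strings)
def pvFrontendLangs : List String := ["JavaScript", "TypeScript", "HTML", "CSS", "React", "Vue", "Angular", "Svelte"]
def pvBackendLangs : List String := ["Python", "Java", "Go", "Ruby", "PHP", "C#", "Rust", "Kotlin", "Scala"]
def pvMobileLangs : List String := ["Swift", "Kotlin", "Dart", "Objective-C", "React Native", "Flutter"]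
def pvDevopsLangs : List String := ["Shell", "Bash", "PowerShell", "Dockerfile", "YAML", "HCL"]
def pvDataLangs : List String := ["Python", "R", "Julia", "SQL", "Scala"]

-- sum(languages.get(lang, 0) for lang in cat)
def pvSumGet (languages : List (String × Int)) (cat : List String) : Int :=
  cat.foldl (fun s lang => s + (PySem.Dict.mk languages).getD lang 0) 0

def categorize_candidate (languages : List (String × Int)) : String :=
  if languages.isEmpty then "Software Developer"
  else
    let frontend_score := pvSumGet languages pvFrontendLangs
    let backend_score := pvSumGet languages pvBackendLangs
    let mobile_score := pvSumGet languages pvMobileLangs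
    let devops_score := pvSumGet languages pvDevopsLangs
    let data_score := pvSumGet languages pvDataLangs
    if frontend_score > 0 ∧ backend_score > 0 ∧ frontend_score + backend_score > mobile_score then
      "Full-Stack Developer"
    else if mobile_score > frontend_score ∧ mobile_score > backend_score then
      "Mobile Developer"
    else if frontend_score > backend_score then
      "Frontend Developer"
    else if backend_score > frontend_score then
      "Backend Developer"
    else if devops_score > frontend_score ∧ devops_score > backend_score then
      "DevOps Engineer"
    else if data_score > 0 ∧ (PySem.Dict.mk languages).contains "Python" ∧ (PySem.Dict.mk languages).contains "R" then
      "Data Scientist"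
    else
      "Software Developer"

-- ===== PORT B =====
-- B's module-level inverted index LANG_CATS (dict in insertion order)
def pvLangCats : List (String × List Nat) :=
  [("JavaScript", [0]), ("TypeScript", [0]), ("HTML", [0]), ("CSS", [0]),
   ("React", [0]), ("Vue", [0]), ("Angular", [0]), ("Svelte", [0]),
   ("Python", [1, 4]), ("Java", [1]), ("Go", [1]), ("Ruby", [1]), ("PHP", [1]),
   ("C#", [1]), ("Rust", [1]), ("Kotlin", [1, 2]), ("Scala", [1, 4]),
   ("Swift", [2]), ("Dart", [2]), ("Objective-C", [2]), ("React Native", [2]),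
   ("Flutter", [2]),
   ("Shell", [3]), ("Bash", [3]), ("PowerShell", [3]), ("Dockerfile", [3]),
   ("YAML", [3]), ("HCL", [3]),
   ("R", [4]), ("Julia", [4]), ("SQL", [4])]

-- scores[cat] += count, the score list ported as a 5-tuple: every index stored in
-- pvLangCats is a literal 0..4, so the tuple update is exact; the catch-all branch is
-- a totality guard only (never reached by the table's indices).
def pvBump (s : Int × Int × Int × Int × Int) (c : Nat) (v : Int) : Int × Int × Int × Int × Int :=
  match c with
  | 0 => (s.1 + v, s.2.1, s.2.2.1, s.2.2.2.1, s.2.2.2.2)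
  | 1 => (s.1, s.2.1 + v, s.2.2.1, s.2.2.2.1, s.2.2.2.2)
  | 2 => (s.1, s.2.1, s.2.2.1 + v, s.2.2.2.1, s.2.2.2.2)
  | 3 => (s.1, s.2.1, s.2.2.1, s.2.2.2.1 + v, s.2.2.2.2)
  | 4 => (s.1, s.2.1, s.2.2.1, s.2.2.2.1, s.2.2.2.2 + v)
  | _ => s

def categorize_candidate_alt (languages : List (String × Int)) : String :=
  if languages.isEmpty then "Software Developer"
  else
    let scores : Int × Int × Int × Int × Int :=
      languages.foldl
        (fun s p =>
          ((PySem.Dict.mk pvLangCats).getD p.1 []).foldl (fun s c => pvBump s c p.2) s)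
        (0, 0, 0, 0, 0)
    let frontend_score := scores.1
    let backend_score := scores.2.1
    let mobile_score := scores.2.2.1
    let devops_score := scores.2.2.2.1
    let data_score := scores.2.2.2.2
    if frontend_score > 0 ∧ backend_score > 0 ∧ frontend_score + backend_score > mobile_score then
      "Full-Stack Developer"
    else if mobile_score > frontend_score ∧ mobile_score > backend_score then
      "Mobile Developer"
    else if frontend_score > backend_score then
      "Frontend Developer"
    else if backend_score > frontend_score then
      "Backend Developer"
    else if devops_score > frontend_score ∧ devops_score > backend_score then
      "DevOps Engineer"
    else if data_score > 0 ∧ (PySem.Dict.mk languages).contains "Python" ∧ (PySem.Dict.mk languages).contains "R" then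
      "Data Scientist"
    else
      "Software Developer"

-- ===== PRECONDITION & SPEC =====
-- Pre_ requires distinct keys: the Python argument is a dict, whose keys are unique by
-- construction; an assoc list with a repeated key represents no dict input of A.
def Pre_categorize_candidate (languages : List (String × Int)) : Prop :=
  (languages.map Prod.fst).Nodup
instance (languages : List (String × Int)) : Decidable (Pre_categorize_candidate languages) := by
  unfold Pre_categorize_candidate; infer_instance

def pvWitness_categorize_candidate : (List (String × Int)) := [("Python", 3), ("R", 1), ("Kotlin", 2)]

def Spec_categorize_candidate (languages : List (String × Int)) (out : String) : Prop := out = categorize_candidate_alt languages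
instance (languages : List (String × Int)) (out : String) : Decidable (Spec_categorize_candidate languages out) := by unfold Spec_categorize_candidate; infer_instance

-- ===== CLAIM (what is proved, stated in full; the proofs are below) =====
def Claim_equal_categorize_candidate : Prop := ∀ (languages : List (String × Int)), Dom_categorize_candidate languages → Pre_categorize_candidate languages → Spec_categorize_candidate languages (categorize_candidate languages)

-- ===== LEMMAS AND PROOFS =====

-- replacing one lookup value in a sum over distinct category names
lemma sum_map_ite_key (cat : List String) (k : String) (v : Int) (f : String → Int)
    (hfk : f k = 0) :
    cat.Nodup →
    (cat.map (fun l => if l = k then v else f l)).sum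
      = (if k ∈ cat then v else 0) + (cat.map f).sum := by
  induction cat with
  | nil => simp
  | cons l cat' ih =>
    intro hcat
    obtain ⟨hl, hcat'⟩ := List.nodup_cons.mp hcat
    by_cases hlk : l = k
    · subst hlk
      have hmc : (cat'.map (fun x => if x = l then v else f x)) = cat'.map f := by
        apply List.map_congr_left
        intro x hx
        have : x ≠ l := fun h => hl (h ▸ hx)
        simp [this]
      simp [hmc, hfk]
    · have hih := ih hcat'
      simp only [List.map_cons, List.sum_cons, hlk, if_false, hih, List.mem_cons]
      by_cases hk : k ∈ cat'
      · simp [hk, Ne.symm hlk]; ring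
      · simp [hk, Ne.symm hlk]

-- a key absent from the assoc list looks up to the default 0
lemma getD_not_key (d : List (String × Int)) (k : String)
    (h : k ∉ d.map Prod.fst) : (PySem.Dict.mk d).getD k 0 = 0 := by
  induction d with
  | nil => simp [PySem.Dict.getD, PySem.Dict.get?]
  | cons p t ih =>
    simp only [List.map_cons, List.mem_cons] at h
    obtain ⟨h1, h2⟩ := not_or.mp h
    rw [PySem.Dict.getD_eq_get?_getD, PySem.Dict.get?_mk_cons]
    have hb : (p.1 == k) = false := by simp [Ne.symm h1]
    rw [hb]
    simpa [PySem.Dict.getD_eq_get?_getD] using ih h2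

-- A's sum of lookups over a category equals the filtered sum over the items
lemma sum_getD_eq (cat : List String) (hcat : cat.Nodup) (d : List (String × Int)) :
    (d.map Prod.fst).Nodup →
      (cat.map (fun l => (PySem.Dict.mk d).getD l 0)).sum
        = (d.map (fun p => if cat.contains p.1 then p.2 else 0)).sum := by
  induction d with
  | nil => intro _; simp [PySem.Dict.getD, PySem.Dict.get?]
  | cons p t ih =>
    intro hnd
    simp only [List.map_cons, List.nodup_cons] at hnd
    obtain ⟨hp, ht⟩ := hnd
    have hget : ∀ l, (PySem.Dict.mk (p :: t)).getD l 0
        = if l = p.1 then p.2 else (PySem.Dict.mk t).getD l 0 := by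
      intro l
      rw [PySem.Dict.getD_eq_get?_getD, PySem.Dict.get?_mk_cons]
      by_cases h : l = p.1
      · have hb : (p.1 == l) = true := by simp [h]
        rw [hb]; simp [h]
      · have hb : (p.1 == l) = false := by simp [Ne.symm h]
        rw [hb]; simp [h, PySem.Dict.getD_eq_get?_getD]
    simp only [hget]
    rw [sum_map_ite_key cat p.1 p.2 (fun l => (PySem.Dict.mk t).getD l 0)
          (getD_not_key t p.1 hp) hcat]
    rw [ih ht]
    simp only [List.map_cons, List.sum_cons, List.contains_iff_mem]

-- the score computed by A equals the filtered sum over the items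
lemma score_eq (cat : List String) (hcat : cat.Nodup) (d : List (String × Int))
    (hnd : (d.map Prod.fst).Nodup) :
    pvSumGet d cat = (d.map (fun p => if cat.contains p.1 then p.2 else 0)).sum := by
  unfold pvSumGet
  rw [PySem.List.foldl_add]
  simpa using sum_getD_eq cat hcat d hnd

-- lookup in the inverted index, counted at a category i, agrees with membership in
-- the category set (for a table whose entries all agree with cat and cover cat)
lemma table_count (i : Nat) (cat : List String) (lang : String) :
    ∀ (t : List (String × List Nat)),
      (∀ p ∈ t, p.2.count i = if cat.contains p.1 then 1 else 0) →
      (cat.contains lang = true → lang ∈ t.map Prod.fst) →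
      ((PySem.Dict.mk t).getD lang []).count i = if cat.contains lang then 1 else 0 := by
  intro t
  induction t with
  | nil =>
    intro _ hcov
    have hc : lang ∉ cat := fun hm =>
      by simpa using hcov (by simpa [List.contains_iff_mem] using hm)
    simp [PySem.Dict.getD, PySem.Dict.get?, hc]
  | cons p t' ih =>
    intro hent hcov
    rw [PySem.Dict.getD_eq_get?_getD, PySem.Dict.get?_mk_cons]
    by_cases h : p.1 = lang
    · have hb : (p.1 == lang) = true := by simp [h]
      rw [hb]
      simpa [h] using hent p (List.mem_cons_self ..)
    · have hb : (p.1 == lang) = false := by simp [h]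
      rw [hb]
      simp only [Bool.false_eq_true, ite_false]
      rw [← PySem.Dict.getD_eq_get?_getD]
      apply ih (fun q hq => hent q (List.mem_cons_of_mem _ hq))
      intro hc
      have := hcov hc
      simp only [List.map_cons, List.mem_cons] at this
      rcases this with h' | h'
      · exact absurd h'.symm h
      · exact h'

-- the inner fold over one item's category indices, componentwise
lemma bump_fold (v : Int) :
    ∀ (cats : List Nat) (s : Int × Int × Int × Int × Int),
      cats.foldl (fun s c => pvBump s c v) s
        = (s.1 + (cats.count 0 : Int) * v, s.2.1 + (cats.count 1 : Int) * v, s.2.2.1 + (cats.count 2 : Int) * v,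
           s.2.2.2.1 + (cats.count 3 : Int) * v, s.2.2.2.2 + (cats.count 4 : Int) * v) := by
  intro cats
  induction cats with
  | nil => intro s; simp
  | cons c rest ih =>
    intro s
    rw [List.foldl_cons, ih]
    match c with
    | 0 => simp [pvBump, List.count_cons]; ring
    | 1 => simp [pvBump]; ring
    | 2 => simp [pvBump]; ring
    | 3 => simp [pvBump]; ring
    | 4 => simp [pvBump]; ring
    | (n+5) => simp [pvBump]

-- B's outer fold splits into five per-category sums
lemma outer_fold (d : List (String × Int)) :
    ∀ (s : Int × Int × Int × Int × Int),
      d.foldl (fun s p => ((PySem.Dict.mk pvLangCats).getD p.1 []).foldl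
                 (fun s c => pvBump s c p.2) s) s
        = (s.1 + (d.map (fun p => (((PySem.Dict.mk pvLangCats).getD p.1 []).count 0 : Int) * p.2)).sum,
           s.2.1 + (d.map (fun p => (((PySem.Dict.mk pvLangCats).getD p.1 []).count 1 : Int) * p.2)).sum,
           s.2.2.1 + (d.map (fun p => (((PySem.Dict.mk pvLangCats).getD p.1 []).count 2 : Int) * p.2)).sum,
           s.2.2.2.1 + (d.map (fun p => (((PySem.Dict.mk pvLangCats).getD p.1 []).count 3 : Int) * p.2)).sum,
           s.2.2.2.2 + (d.map (fun p => (((PySem.Dict.mk pvLangCats).getD p.1 []).count 4 : Int) * p.2)).sum) := by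
  induction d with
  | nil => intro s; simp
  | cons p t ih =>
    intro s
    rw [List.foldl_cons, bump_fold, ih]
    simp only [List.map_cons, List.sum_cons]
    ring_nf

-- one component of B's fold equals A's category score
lemma component_eq (i : Nat) (cat : List String) (hcat : cat.Nodup)
    (hent : ∀ p ∈ pvLangCats, p.2.count i = if cat.contains p.1 then 1 else 0)
    (hcov : ∀ l ∈ cat, l ∈ pvLangCats.map Prod.fst)
    (d : List (String × Int)) (hnd : (d.map Prod.fst).Nodup) :
    (d.map (fun p => (((PySem.Dict.mk pvLangCats).getD p.1 []).count i : Int) * p.2)).sum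
      = pvSumGet d cat := by
  rw [score_eq cat hcat d hnd]
  apply congrArg List.sum
  apply List.map_congr_left
  intro p _
  rw [table_count i cat p.1 pvLangCats hent
        (fun h => hcov p.1 (by simpa using h))]
  by_cases h : cat.contains p.1 = true
  · simp [h]
  · simp [eq_false_of_ne_true h]

-- ===== VERDICT (by name: the statement is the Claim_ definition above) =====
theorem categorize_candidate_spec : Claim_equal_categorize_candidate := by
  intro languages _ hpre
  unfold Spec_categorize_candidate
  unfold categorize_candidate categorize_candidate_alt
  by_cases hne : languages.isEmpty
  · simp [hne]
  · simp only [hne, Bool.false_eq_true, if_false]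
    rw [outer_fold]
    simp only [zero_add]
    rw [component_eq 0 pvFrontendLangs (by decide) (by decide) (by decide) languages hpre,
        component_eq 1 pvBackendLangs (by decide) (by decide) (by decide) languages hpre,
        component_eq 2 pvMobileLangs (by decide) (by decide) (by decide) languages hpre,
        component_eq 3 pvDevopsLangs (by decide) (by decide) (by decide) languages hpre,
        component_eq 4 pvDataLangs (by decide) (by decide) (by decide) languages hpre]
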